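-- pv_equiv track=rewrite | github.com/yuly3/atcoder | other/past202004-open/D.py | f
-- ===== SOURCE A (Python) =====
-- def f(s):
--     n = len(s)
--     res = []
--     for bit in range(1 << n):
--         t = ''
--         for k in range(n):
--             t += s[k] if bit >> k & 1 else '.'
--         res.append(t)
--     return res
-- ===== SOURCE B (Python) =====
-- def f(s):
--     res = ['']
--     for c in s:
--         res = [t + '.' for t in res] + [t + c for t in res]
--     return res
-- ===== Notes on version B (the rewrite author's own statement) =====
-- stated objective: simpler
-- what changed: B builds the list by doubling: one pass over the string, replacing each partial result with its dot-extended and char-extended copies, instead of enumerating all 2^n integer masks with an inner per-bit loop.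
import Mathlib
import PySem

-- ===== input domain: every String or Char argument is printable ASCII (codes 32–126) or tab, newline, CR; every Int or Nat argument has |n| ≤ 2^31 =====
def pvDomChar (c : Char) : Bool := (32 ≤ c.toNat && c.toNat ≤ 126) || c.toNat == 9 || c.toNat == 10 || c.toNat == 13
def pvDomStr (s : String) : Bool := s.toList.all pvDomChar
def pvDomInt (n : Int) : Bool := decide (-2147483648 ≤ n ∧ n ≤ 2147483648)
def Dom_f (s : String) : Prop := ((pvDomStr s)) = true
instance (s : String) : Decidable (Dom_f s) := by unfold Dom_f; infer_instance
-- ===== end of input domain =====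

-- B replaces A's enumeration of all 2^n bit masks by a single left-to-right doubling pass
-- over the string (objective: simpler, same ordering of results).

-- ===== PORT A =====
-- literal port of A: outer loop over bit in range(2^n), inner loop over k in range(n);
-- `bit >> k & 1` is Nat.testBit bit k; s[k] (always in range since k < n) is s.toList.getD k '.';
-- the string t is accumulated as a List Char and wrapped with String.mk at the end (exact,
-- since Python str concatenation of single chars = list-of-chars append).
def f (s : String) : List String :=
  let n := s.toList.length
  (List.range (2 ^ n)).foldl
    (fun res bit =>
      res ++ [String.mk ((List.range n).foldl
        (fun t k => t ++ [if bit.testBit k then s.toList.getD k '.' else '.']) [])])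
    []

-- ===== PORT B =====
-- literal port of B: res = [''] then, for each character, res = dotted copies ++ extended copies.
def f_alt (s : String) : List String :=
  (s.toList.foldl
    (fun res c => res.map (fun t => t ++ ['.']) ++ res.map (fun t => t ++ [c]))
    [([] : List Char)]).map String.mk

-- ===== PRECONDITION & SPEC =====
def Spec_f (s : String) (out : List String) : Prop := out = f_alt s
instance (s : String) (out : List String) : Decidable (Spec_f s out) := by unfold Spec_f; infer_instance

-- ===== CLAIM (what is proved, stated in full; the proofs are below) =====
def Claim_equal_f : Prop := ∀ (s : String), Dom_f s → Spec_f s (f s)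

-- ===== LEMMAS AND PROOFS =====

-- the common canonical value: for each mask, the mask-selected string over l
def pvSpecList (l : List Char) : List (List Char) :=
  (List.range (2 ^ l.length)).map
    (fun bit => (List.range l.length).map
      (fun k => if bit.testBit k then l.getD k '.' else '.'))

theorem pv_foldl_append {α β : Type} (xs : List α) (h : α → β) (acc : List β) :
    xs.foldl (fun r x => r ++ [h x]) acc = acc ++ xs.map h := by
  induction xs generalizing acc with
  | nil => simp
  | cons x xs ih => simp [List.foldl_cons, ih]

theorem pv_f_eq (s : String) : f s = (pvSpecList s.toList).map String.mk := by
  unfold f pvSpecList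
  rw [pv_foldl_append (List.range (2 ^ s.toList.length))
      (fun bit => String.mk ((List.range s.toList.length).foldl
        (fun t k => t ++ [if bit.testBit k then s.toList.getD k '.' else '.']) []))]
  simp only [List.nil_append, List.map_map]
  refine List.map_congr_left (fun bit _ => ?_)
  rw [pv_foldl_append]
  simp

theorem pv_falt_eq (l : List Char) :
    l.foldl (fun res c => res.map (fun t => t ++ ['.']) ++ res.map (fun t => t ++ [c]))
      [([] : List Char)] = pvSpecList l := by
  induction l using List.reverseRecOn with
  | nil => simp [pvSpecList]
  | append_singleton l c ih =>
    rw [List.foldl_append, ih]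
    simp only [List.foldl_cons, List.foldl_nil]
    unfold pvSpecList
    have hlen : (l ++ [c]).length = l.length + 1 := by simp
    rw [hlen]
    rw [show List.range (2 ^ (l.length + 1))
          = List.range (2 ^ l.length)
            ++ (List.range (2 ^ l.length)).map (fun x => 2 ^ l.length + x) from by
        rw [show 2 ^ (l.length + 1) = 2 ^ l.length + 2 ^ l.length from by ring,
          List.range_add]]
    rw [List.map_append, List.map_map, List.map_map, List.map_map]
    congr 1
    · refine List.map_congr_left (fun bit hbit => ?_)
      have hb : bit < 2 ^ l.length := List.mem_range.mp hbit
      simp only [Function.comp, List.range_succ, List.map_append, List.map_cons, List.map_nil]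
      congr 1
      · refine List.map_congr_left (fun k hk => ?_)
        have hk' : k < l.length := List.mem_range.mp hk
        rw [List.getD_append _ _ _ _ hk']
      · simp [Nat.testBit_lt_two_pow hb]
    · refine List.map_congr_left (fun bit hbit => ?_)
      have hb : bit < 2 ^ l.length := List.mem_range.mp hbit
      simp only [Function.comp, List.range_succ, List.map_append, List.map_cons, List.map_nil]
      congr 1
      · refine List.map_congr_left (fun k hk => ?_)
        have hk' : k < l.length := List.mem_range.mp hk
        rw [Nat.testBit_two_pow_add_gt hk', List.getD_append _ _ _ _ hk']
      · have h1 : (2 ^ l.length + bit).testBit l.length = true := by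
          rw [Nat.testBit_two_pow_add_eq, Nat.testBit_lt_two_pow hb]; rfl
        simp [h1]

-- ===== VERDICT (by name: the statement is the Claim_ definition above) =====
theorem f_spec : Claim_equal_f := by
  intro s _
  unfold Spec_f f_alt
  rw [pv_f_eq, pv_falt_eq]
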